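-- pv_equiv track=rewrite | github.com/das-saptarshi/codes | geeksforgeeks/You and your books/solution.py | max_Books
-- ===== SOURCE A (Python) =====
-- from typing import List
--
-- def max_Books(n: int, k: int, heights: List[int]) -> int:
--
--     max_books = 0
--     current_books = 0
--
--     for height in heights:
--
--         if height <= k:
--             current_books += height
--         else:
--             max_books = max(max_books, current_books)
--             current_books = 0
--
--     return max(max_books, current_books)
-- ===== SOURCE B (Python) =====
-- from typing import List
--
-- def max_Books(n: int, k: int, heights: List[int]) -> int:
--     # Staged algorithm: build cumulative prefix sums, collect the indices of
--     # the blockers (heights > k), then take the best difference of prefix sums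
--     # between consecutive boundaries.
--     prefix = [0]
--     for h in heights:
--         prefix.append(prefix[-1] + h)
--     cuts = [i for i, h in enumerate(heights) if h > k]
--     cuts.append(len(heights))
--     best = 0
--     prev = -1
--     for c in cuts:
--         s = prefix[c] - prefix[prev + 1]
--         if s > best:
--             best = s
--         prev = c
--     return best
-- ===== Notes on version B (the rewrite author's own statement) =====
-- stated objective: alternative
-- what changed: Replaces A's single streaming pass over a (best, current-run) accumulator with a staged prefix-sum algorithm: build the cumulative-sum array and the list of blocker indices, then compute each segment sum as a difference of prefix sums between consecutive boundaries and keep the best.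
import Mathlib
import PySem

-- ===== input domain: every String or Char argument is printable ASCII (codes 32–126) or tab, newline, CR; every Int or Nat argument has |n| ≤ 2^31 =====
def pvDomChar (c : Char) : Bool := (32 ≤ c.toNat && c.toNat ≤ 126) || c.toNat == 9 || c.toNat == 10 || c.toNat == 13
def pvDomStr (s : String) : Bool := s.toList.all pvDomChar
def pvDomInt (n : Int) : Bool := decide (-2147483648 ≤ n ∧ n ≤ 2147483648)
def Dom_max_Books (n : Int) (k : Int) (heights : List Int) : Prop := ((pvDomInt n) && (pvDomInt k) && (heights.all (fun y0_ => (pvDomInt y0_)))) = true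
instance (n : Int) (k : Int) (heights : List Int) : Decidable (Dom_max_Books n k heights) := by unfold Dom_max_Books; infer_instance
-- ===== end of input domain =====

-- B replaces A's single streaming (best, current-run) pass with a staged
-- prefix-sum algorithm (cumulative sums + blocker boundary indices, segment
-- sums as prefix differences); same O(n) cost, different decomposition.


-- ===== PORT A =====
def max_Books (n : Int) (k : Int) (heights : List Int) : Int :=
  let st := heights.foldl
    (fun (s : Int × Int) height =>
      if height ≤ k then (s.1, s.2 + height) else (max s.1 s.2, 0))
    (0, 0)
  max st.1 st.2

-- ===== PORT B =====
-- every index used on `prefix` is in range (proved in the lemmas below),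
-- so the `pyGetD … 0` transliteration of Python's prefix[·] is exact.
def max_Books_alt (n : Int) (k : Int) (heights : List Int) : Int :=
  -- prefix = [0]; for h in heights: prefix.append(prefix[-1] + h)
  let pfx := heights.foldl
    (fun (ps : List Int) h => ps ++ [PySem.List.pyGetD ps (-1) 0 + h]) [(0 : Int)]
  -- cuts = [i for i, h in enumerate(heights) if h > k]; cuts.append(len(heights))
  let cuts := ((PySem.List.enumerate heights 0).filter (fun ih => ih.2 > k)).map
      (fun ih => ih.1) ++ [(heights.length : Int)]
  -- best = 0; prev = -1; for c in cuts: s = prefix[c] - prefix[prev+1]; …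
  let st := cuts.foldl
    (fun (bp : Int × Int) c =>
      let s := PySem.List.pyGetD pfx c 0 - PySem.List.pyGetD pfx (bp.2 + 1) 0
      (if s > bp.1 then s else bp.1, c))
    ((0 : Int), (-1 : Int))
  st.1

-- ===== PRECONDITION & SPEC =====
def Spec_max_Books (n : Int) (k : Int) (heights : List Int) (out : Int) : Prop := out = max_Books_alt n k heights
instance (n : Int) (k : Int) (heights : List Int) (out : Int) : Decidable (Spec_max_Books n k heights out) := by unfold Spec_max_Books; infer_instance

-- ===== CLAIM (what is proved, stated in full; the proofs are below) =====
def Claim_equal_max_Books : Prop := ∀ (n : Int) (k : Int) (heights : List Int), Dom_max_Books n k heights → Spec_max_Books n k heights (max_Books n k heights)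

-- ===== LEMMAS AND PROOFS =====

-- sum of the first i elements
def pvPre (l : List Int) (i : Nat) : Int := (l.take i).sum

-- blocker indices, as B computes them
def pvCuts (k : Int) (l : List Int) : List Int :=
  ((PySem.List.enumerate l 0).filter (fun ih => ih.2 > k)).map (fun ih => ih.1)

-- B's loop body, expressed with pvPre instead of list indexing
def pvF (l : List Int) (bp : Int × Int) (c : Int) : Int × Int :=
  let s := pvPre l c.toNat - pvPre l (bp.2 + 1).toNat
  (if s > bp.1 then s else bp.1, c)

-- A's loop body
def pvA (k : Int) (s : Int × Int) (height : Int) : Int × Int :=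
  if height ≤ k then (s.1, s.2 + height) else (max s.1 s.2, 0)

theorem pv_pre_le (l : List Int) (x : Int) (i : Nat) (hi : i ≤ l.length) :
    pvPre (l ++ [x]) i = pvPre l i := by
  unfold pvPre
  rw [List.take_append_of_le_length hi]

theorem pv_pre_top (l : List Int) (x : Int) :
    pvPre (l ++ [x]) (l.length + 1) = pvPre l l.length + x := by
  unfold pvPre
  rw [List.take_of_length_le (by simp), List.take_of_length_le (by simp)]
  simp

-- the prefix-building loop produces the scanl of partial sums
theorem pv_pfx_build (l : List Int) : ∀ (ps : List Int) (x : Int),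
    l.foldl (fun (ps : List Int) h => ps ++ [PySem.List.pyGetD ps (-1) 0 + h]) (ps ++ [x])
      = ps ++ List.scanl (· + ·) x l := by
  induction l with
  | nil => intro ps x; simp [List.scanl_nil]
  | cons h t ih =>
      intro ps x
      rw [List.scanl_cons, List.foldl_cons, PySem.List.pyGetD_neg_one_append_singleton]
      have := ih (ps ++ [x]) (x + h)
      rw [List.append_assoc] at this
      rw [List.append_assoc, this]
      simp

theorem pv_scanl_getD (l : List Int) : ∀ (x : Int) (i : Nat), i ≤ l.length →
    (List.scanl (· + ·) x l).getD i 0 = x + pvPre l i := by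
  induction l with
  | nil =>
      intro x i hi
      have : i = 0 := Nat.le_zero.mp hi
      subst this
      simp [List.scanl_nil, pvPre]
  | cons h t ih =>
      intro x i hi
      cases i with
      | zero => rw [List.scanl_cons]; simp [pvPre]
      | succ j =>
          rw [List.scanl_cons, List.getD_cons_succ,
            ih (x + h) j (by simpa using hi)]
          unfold pvPre
          simp [List.take_succ_cons, add_assoc]

-- indexing the built prefix list is pvPre (index in range)
theorem pv_pfx_getD (l : List Int) (j : Int) (h0 : 0 ≤ j) (hn : j ≤ l.length) :
    PySem.List.pyGetD
      (l.foldl (fun (ps : List Int) h => ps ++ [PySem.List.pyGetD ps (-1) 0 + h]) [(0 : Int)]) j 0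
      = pvPre l j.toNat := by
  have hb : ([] : List Int) ++ [(0 : Int)] = [(0 : Int)] := by simp
  rw [← hb, pv_pfx_build l [] 0]
  have hj : j = ((j.toNat : Nat) : Int) := by omega
  rw [hj, PySem.List.pyGetD_natCast]
  rw [List.nil_append]
  rw [pv_scanl_getD l 0 j.toNat (by omega)]
  simp only [zero_add]
  congr 1

-- every cut index is a genuine position of the list
theorem pv_cuts_mem (k : Int) (l : List Int) :
    ∀ c ∈ pvCuts k l, 0 ≤ c ∧ c < l.length := by
  intro c hc
  unfold pvCuts at hc
  obtain ⟨ih, hmem, rfl⟩ := List.mem_map.mp hc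
  have := List.mem_filter.mp hmem
  obtain ⟨j, hj, rfl⟩ := (PySem.List.mem_enumerate_iff _ _ _).mp this.1
  simp
  omega

-- cuts under snoc
theorem pv_cuts_snoc (k : Int) (l : List Int) (x : Int) :
    pvCuts k (l ++ [x]) =
      pvCuts k l ++ (if x > k then [(l.length : Int)] else []) := by
  unfold pvCuts
  rw [PySem.List.enumerate_append]
  simp only [PySem.List.enumerate_cons, PySem.List.enumerate_nil, List.filter_append,
    List.map_append]
  by_cases hx : x > k
  · simp [hx]
  · simp [hx]

-- generic congruence for the pair-fold: two bodies that agree on in-range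
-- states and that both store the cut as new state compute the same fold
theorem pv_fold_congr (n : Int) (F G : Int × Int → Int → Int × Int)
    (hFG : ∀ bp c, 0 ≤ c → c < n → -1 ≤ bp.2 → bp.2 < n → F bp c = G bp c)
    (hF2 : ∀ bp c, (F bp c).2 = c) :
    ∀ (cs : List Int) (bp : Int × Int), (∀ c ∈ cs, 0 ≤ c ∧ c < n) →
      -1 ≤ bp.2 → bp.2 < n → cs.foldl F bp = cs.foldl G bp := by
  intro cs
  induction cs with
  | nil => intro bp _ _ _; rfl
  | cons c t ih =>
      intro bp hcs h1 h2
      have hc := hcs c (by simp)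
      simp only [List.foldl_cons]
      rw [hFG bp c hc.1 hc.2 h1 h2]
      have h2' : (G bp c).2 = c := by rw [← hFG bp c hc.1 hc.2 h1 h2]; exact hF2 bp c
      exact ih (G bp c) (fun d hd => hcs d (by simp [hd])) (by omega) (by omega)

-- spec-level fold is invariant under snoc of the underlying list
theorem pv_fold_pre_snoc (l : List Int) (x : Int) (cs : List Int) (bp : Int × Int)
    (hcs : ∀ c ∈ cs, 0 ≤ c ∧ c < (l.length : Int))
    (h1 : -1 ≤ bp.2) (h2 : bp.2 < (l.length : Int)) :
    cs.foldl (pvF (l ++ [x])) bp = cs.foldl (pvF l) bp := by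
  refine pv_fold_congr (l.length : Int) _ _ ?_ (fun bp c => rfl) cs bp hcs h1 h2
  intro bp c hc0 hcn hp1 hp2
  unfold pvF
  rw [pv_pre_le l x c.toNat (by omega), pv_pre_le l x (bp.2 + 1).toNat (by omega)]

-- the last cut (or -1) is in range
theorem pv_last_range (k : Int) (l : List Int) :
    -1 ≤ (pvCuts k l).getLastD (-1) ∧ (pvCuts k l).getLastD (-1) + 1 ≤ (l.length : Int) := by
  have hm : (pvCuts k l).getLastD (-1) ∈ (-1 : Int) :: pvCuts k l :=
    List.getLastD_mem_cons
  rcases List.mem_cons.mp hm with h | h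
  · rw [h]; constructor <;> omega
  · have := pv_cuts_mem k l _ h; constructor <;> omega

-- MAIN INVARIANT: folding B's body over the cut list reproduces A's state
theorem pv_main (k : Int) (l : List Int) :
    (pvCuts k l).foldl (pvF l) (0, -1)
        = ((l.foldl (pvA k) (0, 0)).1, (pvCuts k l).getLastD (-1))
    ∧ (l.foldl (pvA k) (0, 0)).2
        = pvPre l l.length - pvPre l ((pvCuts k l).getLastD (-1) + 1).toNat := by
  induction l using List.reverseRecOn with
  | nil => constructor <;> simp [pvCuts, PySem.List.enumerate_nil, pvPre]
  | append_singleton l x ih =>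
      obtain ⟨ih1, ih2⟩ := ih
      have hlast := pv_last_range k l
      have hmem := pv_cuts_mem k l
      have hsnoc := pv_cuts_snoc k l x
      have hA : (l ++ [x]).foldl (pvA k) (0, 0) = pvA k (l.foldl (pvA k) (0, 0)) x :=
        List.foldl_append ..
      by_cases hx : x > k
      · -- x is a blocker: a new cut l.length is appended
        rw [if_pos hx] at hsnoc
        have hA' : pvA k (l.foldl (pvA k) (0, 0)) x
            = (max (l.foldl (pvA k) (0, 0)).1 (l.foldl (pvA k) (0, 0)).2, 0) := by
          unfold pvA; rw [if_neg (by omega)]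
        constructor
        · rw [hsnoc, List.foldl_append,
            pv_fold_pre_snoc l x (pvCuts k l) (0, -1) hmem (by norm_num)
              (by simp; omega),
            ih1]
          simp only [List.foldl_cons, List.foldl_nil]
          unfold pvF
          simp only [Int.toNat_natCast]
          rw [pv_pre_le l x l.length le_rfl,
              pv_pre_le l x ((pvCuts k l).getLastD (-1) + 1).toNat (by omega)]
          rw [hA, hA', ← ih2]
          simp only [List.getLastD_concat, Prod.mk.injEq]
          refine ⟨?_, trivial⟩
          rcases le_or_gt (l.foldl (pvA k) (0, 0)).2 (l.foldl (pvA k) (0, 0)).1 with h | h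
          · rw [if_neg (by omega), max_eq_left h]
          · rw [if_pos (by omega), max_eq_right (le_of_lt h)]
        · rw [hA, hA', hsnoc]
          simp only [List.getLastD_concat]
          rw [show ((l.length : Int) + 1).toNat = l.length + 1 by omega, pv_pre_top l x]
          have : pvPre (l ++ [x]) (l ++ [x]).length = pvPre l l.length + x := by
            simpa using pv_pre_top l x
          rw [this]
          omega
      · -- x extends the current run: cuts unchanged, current sum grows by x
        rw [if_neg hx] at hsnoc
        rw [List.append_nil] at hsnoc
        have hA' : pvA k (l.foldl (pvA k) (0, 0)) x
            = ((l.foldl (pvA k) (0, 0)).1, (l.foldl (pvA k) (0, 0)).2 + x) := by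
          unfold pvA; rw [if_pos (by omega)]
        constructor
        · rw [hsnoc,
            pv_fold_pre_snoc l x (pvCuts k l) (0, -1) hmem (by norm_num)
              (by simp; omega),
            ih1, hA, hA']
        · rw [hA, hA', hsnoc]
          have h1 : pvPre (l ++ [x]) (l ++ [x]).length = pvPre l l.length + x := by
            simpa using pv_pre_top l x
          rw [h1, pv_pre_le l x ((pvCuts k l).getLastD (-1) + 1).toNat (by omega)]
          omega

-- port-shaped helpers naming the port's prefix list and loop body
def pvPfxL (l : List Int) : List Int :=
  l.foldl (fun (ps : List Int) h => ps ++ [PySem.List.pyGetD ps (-1) 0 + h]) [(0 : Int)]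

def pvFP (l : List Int) (bp : Int × Int) (c : Int) : Int × Int :=
  (if PySem.List.pyGetD (pvPfxL l) c 0 - PySem.List.pyGetD (pvPfxL l) (bp.2 + 1) 0 > bp.1
   then PySem.List.pyGetD (pvPfxL l) c 0 - PySem.List.pyGetD (pvPfxL l) (bp.2 + 1) 0
   else bp.1, c)

-- ===== VERDICT (by name: the statement is the Claim_ definition above) =====
theorem max_Books_spec : Claim_equal_max_Books := by
  intro n k l _
  unfold Spec_max_Books
  obtain ⟨h1, h2⟩ := pv_main k l
  have hlast := pv_last_range k l
  have hmem := pv_cuts_mem k l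
  have hA0 : max_Books n k l
      = max (l.foldl (pvA k) (0, 0)).1 (l.foldl (pvA k) (0, 0)).2 := rfl
  have hB0 : max_Books_alt n k l
      = ((pvCuts k l ++ [(l.length : Int)]).foldl (pvFP l) (0, -1)).1 := rfl
  rw [hA0, hB0, List.foldl_append]
  have hcv : (pvCuts k l).foldl (pvFP l) (0, -1) = (pvCuts k l).foldl (pvF l) (0, -1) := by
    refine pv_fold_congr (l.length : Int) _ _ ?_ (fun bp c => rfl) _ _ hmem (by norm_num)
      (by omega)
    intro bp c hc0 hcn hp1 hp2
    unfold pvFP pvPfxL pvF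
    rw [pv_pfx_getD l c hc0 (by omega), pv_pfx_getD l (bp.2 + 1) (by omega) (by omega)]
  rw [hcv, h1]
  simp only [List.foldl_cons, List.foldl_nil]
  unfold pvFP pvPfxL
  rw [pv_pfx_getD l (l.length : Int) (by omega) (by omega)]
  rw [pv_pfx_getD l ((pvCuts k l).getLastD (-1) + 1) (by omega) (by omega)]
  simp only [Int.toNat_natCast]
  rw [← h2]
  rcases le_or_gt (l.foldl (pvA k) (0, 0)).2 (l.foldl (pvA k) (0, 0)).1 with h | h
  · rw [if_neg (by omega), max_eq_left h]
  · rw [if_pos (by omega), max_eq_right (le_of_lt h)]
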